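-- pv_equiv track=rewrite | github.com/Jobi060704/Hackaton-Y1-RMIT | main.py | search_base
-- ===== SOURCE A (Python) =====
-- def search_base(req, att_sel, data):
--
--     exact_sugg = []
--     part_sugg = []
--
--     for f in data:
--
--         for i in f:
--             if str(i[att_sel]) == str(req):
--                 exact_sugg.append(i)
--
--         for i in f:
--             if str(i[att_sel]).find(str(req)) != -1:
--                 part_sugg.append(i)
--
--
--     return exact_sugg, part_sugg
-- ===== SOURCE B (Python) =====
-- def search_base(req, att_sel, data):
--     # Every exact match is also a substring match, so compute the partial-match
--     # list once over the flattened data and derive the exact list from it.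
--     r = str(req)
--     part_sugg = [i for f in data for i in f
--                  if str(i[att_sel]).find(r) != -1]
--     exact_sugg = [i for i in part_sugg if str(i[att_sel]) == r]
--     return exact_sugg, part_sugg
-- ===== Notes on version B (the rewrite author's own statement) =====
-- stated objective: alternative
-- what changed: B scans the data once to build the partial-match list and then derives the exact-match list by filtering that partial list (exact matches are a subset of substring matches), instead of A's two separate scans of every record list.
-- outside the precondition, e.g. on search_base('x', 'k', [[{'a': 'b'}]]): A raises KeyError, B raises KeyError
import Mathlib
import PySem

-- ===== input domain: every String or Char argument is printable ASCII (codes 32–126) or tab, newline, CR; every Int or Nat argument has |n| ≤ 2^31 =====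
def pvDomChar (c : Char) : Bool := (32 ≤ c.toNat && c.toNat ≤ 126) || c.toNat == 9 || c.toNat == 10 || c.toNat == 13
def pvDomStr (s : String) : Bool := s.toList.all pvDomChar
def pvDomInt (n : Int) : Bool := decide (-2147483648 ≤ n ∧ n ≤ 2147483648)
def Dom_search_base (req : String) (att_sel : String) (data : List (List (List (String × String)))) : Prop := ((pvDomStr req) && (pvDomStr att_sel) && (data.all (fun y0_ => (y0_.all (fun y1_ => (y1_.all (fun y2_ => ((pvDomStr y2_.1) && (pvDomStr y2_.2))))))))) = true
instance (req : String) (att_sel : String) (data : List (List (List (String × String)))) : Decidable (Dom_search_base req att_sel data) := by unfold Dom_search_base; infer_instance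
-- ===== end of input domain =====

-- B builds the partial-match list in one scan and derives the exact list by filtering it; return value only, no side effects.

-- ===== PORT A =====
-- i[att_sel]: first-match lookup in the association list (Pre_ guarantees the key is present,
-- so the .getD "" default is never consulted inside Pre_).
def search_base (req : String) (att_sel : String) (data : List (List (List (String × String)))) : (List (List (String × String))) × (List (List (String × String))) :=
  data.foldl
    (fun st f =>
      let exact_sugg := f.foldl
        (fun acc i => if (List.lookup att_sel i).getD "" = req then acc ++ [i] else acc) st.1
      let part_sugg := f.foldl
        (fun acc i => if PySem.Str.find ((List.lookup att_sel i).getD "") req ≠ -1 then acc ++ [i] else acc) st.2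
      (exact_sugg, part_sugg))
    ([], [])

-- ===== PORT B =====
def search_base_alt (req : String) (att_sel : String) (data : List (List (List (String × String)))) : (List (List (String × String))) × (List (List (String × String))) :=
  let part_sugg := data.flatMap
    (fun f => f.filter (fun i => PySem.Str.find ((List.lookup att_sel i).getD "") req != -1))
  let exact_sugg := part_sugg.filter (fun i => (List.lookup att_sel i).getD "" == req)
  (exact_sugg, part_sugg)

-- ===== PRECONDITION & SPEC =====
-- Pre_ excludes exactly the inputs where some record lacks the key att_sel, on which A raises KeyError.
def Pre_search_base (_req : String) (att_sel : String) (data : List (List (List (String × String)))) : Prop :=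
  (data.all (fun f => f.all (fun i => (List.lookup att_sel i).isSome))) = true
instance (req : String) (att_sel : String) (data : List (List (List (String × String)))) : Decidable (Pre_search_base req att_sel data) := by unfold Pre_search_base; infer_instance

def pvWitness_search_base : String × String × (List (List (List (String × String)))) :=
  ("ab", "name", [[[("name", "ab")], [("name", "xaby")]], [[("name", "zz")]]])

def Spec_search_base (req : String) (att_sel : String) (data : List (List (List (String × String)))) (out : (List (List (String × String))) × (List (List (String × String)))) : Prop := out = search_base_alt req att_sel data
instance (req : String) (att_sel : String) (data : List (List (List (String × String)))) (out : (List (List (String × String))) × (List (List (String × String)))) : Decidable (Spec_search_base req att_sel data out) := by unfold Spec_search_base; infer_instance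

-- ===== CLAIM (what is proved, stated in full; the proofs are below) =====
def Claim_equal_search_base : Prop := ∀ (req : String) (att_sel : String) (data : List (List (List (String × String)))), Dom_search_base req att_sel data → Pre_search_base req att_sel data → Spec_search_base req att_sel data (search_base req att_sel data)

-- ===== LEMMAS AND PROOFS =====

-- A's accumulator after the whole outer loop: each component is the filter of the flattened data.
theorem search_base_eq_filters (req att_sel : String) (data : List (List (List (String × String)))) :
    search_base req att_sel data
      = ((data.flatMap id).filter (fun i => decide ((List.lookup att_sel i).getD "" = req)),
         (data.flatMap id).filter (fun i => decide (PySem.Str.find ((List.lookup att_sel i).getD "") req ≠ -1))) := by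
  unfold search_base
  induction data using List.reverseRecOn with
  | nil => rfl
  | append_singleton data f ih =>
    rw [List.foldl_append, ih]
    simp only [List.foldl_cons, List.foldl_nil,
      PySem.List.foldl_append_ite_eq_filter, List.flatMap_append, List.filter_append,
      List.flatMap_singleton, id]

-- an exact match is a partial match: filtering the partial list by equality gives the exact filter
theorem filter_part_eq_exact (req att_sel : String) (l : List (List (String × String))) :
    (l.filter (fun i => decide (PySem.Str.find ((List.lookup att_sel i).getD "") req ≠ -1))).filter
        (fun i => decide ((List.lookup att_sel i).getD "" = req))
      = l.filter (fun i => decide ((List.lookup att_sel i).getD "" = req)) := by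
  rw [List.filter_filter]
  apply List.filter_congr
  intro i _
  by_cases h : (List.lookup att_sel i).getD "" = req
  · have hf : PySem.Chars.find req.toList req.toList ≠ -1 :=
      (PySem.Chars.find_ne_neg_one_iff _ _).mpr (List.infix_refl _)
    simp [h, hf]
  · simp [h]

theorem search_base_eq_alt (req att_sel : String) (data : List (List (List (String × String)))) :
    search_base req att_sel data = search_base_alt req att_sel data := by
  rw [search_base_eq_filters]
  unfold search_base_alt
  have hb1 : (fun i : List (String × String) => PySem.Str.find ((List.lookup att_sel i).getD "") req != -1)
      = (fun i => decide (PySem.Str.find ((List.lookup att_sel i).getD "") req ≠ -1)) := by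
    funext i
    by_cases h : PySem.Chars.find ((List.lookup att_sel i).getD "").toList req.toList = -1 <;>
      simp [PySem.Str.find_eq, h]
  have hb2 : (fun i : List (String × String) => (List.lookup att_sel i).getD "" == req)
      = (fun i => decide ((List.lookup att_sel i).getD "" = req)) := by
    funext i; by_cases h : (List.lookup att_sel i).getD "" = req <;> simp [h]
  simp only [hb1, hb2]
  have hpart : data.flatMap
      (fun f => f.filter (fun i => decide (PySem.Str.find ((List.lookup att_sel i).getD "") req ≠ -1)))
      = (data.flatMap id).filter (fun i => decide (PySem.Str.find ((List.lookup att_sel i).getD "") req ≠ -1)) := by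
    induction data with
    | nil => rfl
    | cons f data ih =>
      rw [List.flatMap_cons, List.flatMap_cons, List.filter_append, ih]
      rfl
  rw [hpart, filter_part_eq_exact]

-- ===== VERDICT (by name: the statement is the Claim_ definition above) =====
theorem search_base_spec : Claim_equal_search_base := by
  intro req att_sel data _ _
  exact search_base_eq_alt req att_sel data
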